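-- pv_equiv track=rewrite | github.com/DaniPooh777/ROGUETHON | procgen.py | get_max_value_for_floor
-- ===== SOURCE A (Python) =====
-- from typing import Iterator, List, Tuple, TYPE_CHECKING, Dict  # Importación de tipos para la comprobación de tipos.
--
-- def get_max_value_for_floor(
--     weighted_chances_by_floor: List[Tuple[int, int]], floor: int
-- ) -> int:
--     """Obtiene el valor máximo permitido para un piso dado."""
--     current_value = 0
--
--     for floor_minimum, value in weighted_chances_by_floor:
--         if floor >= floor_minimum:
--             current_value = value  # Actualiza el valor si el piso cumple con el mínimo.
--
--     return current_value
-- ===== SOURCE B (Python) =====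
-- def get_max_value_for_floor(weighted_chances_by_floor, floor):
--     """Backward early-exit scan: the last forward match is the first reverse match."""
--     for floor_minimum, value in reversed(weighted_chances_by_floor):
--         if floor >= floor_minimum:
--             return value
--     return 0
-- ===== Notes on version B (the rewrite author's own statement) =====
-- stated objective: idiomatic
-- what changed: Replaced the full forward scan that keeps overwriting an accumulator with an early-exit backward scan that returns the first pair (in reverse order) whose floor_minimum <= floor, 0 if none matches.
import Mathlib
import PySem

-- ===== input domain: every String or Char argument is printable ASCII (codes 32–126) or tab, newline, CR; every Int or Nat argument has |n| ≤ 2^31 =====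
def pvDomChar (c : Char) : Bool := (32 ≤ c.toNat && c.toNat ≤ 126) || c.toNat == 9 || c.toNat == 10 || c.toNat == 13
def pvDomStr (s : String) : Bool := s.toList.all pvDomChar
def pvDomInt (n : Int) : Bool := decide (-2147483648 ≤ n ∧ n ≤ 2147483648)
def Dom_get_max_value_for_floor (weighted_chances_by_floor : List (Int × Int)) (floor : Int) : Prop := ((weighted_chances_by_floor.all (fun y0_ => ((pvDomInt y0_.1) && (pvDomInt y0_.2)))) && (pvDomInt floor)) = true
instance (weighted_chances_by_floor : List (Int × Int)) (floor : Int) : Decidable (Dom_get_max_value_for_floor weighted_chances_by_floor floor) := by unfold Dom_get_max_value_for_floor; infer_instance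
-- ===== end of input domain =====

-- B replaces A's forward scan-and-overwrite by an early-exit backward scan (idiomatic; same cost).

-- ===== PORT A =====
-- forward loop keeping an accumulator, overwritten on every match
def get_max_value_for_floor (weighted_chances_by_floor : List (Int × Int)) (floor : Int) : Int :=
  weighted_chances_by_floor.foldl
    (fun current_value p => if floor ≥ p.1 then p.2 else current_value) 0

-- ===== PORT B =====
-- early-exit scan over the reversed list
def pvAltLoop (floor : Int) : List (Int × Int) → Int
  | [] => 0
  | (floor_minimum, value) :: rest =>
      if floor ≥ floor_minimum then value else pvAltLoop floor rest

def get_max_value_for_floor_alt (weighted_chances_by_floor : List (Int × Int)) (floor : Int) : Int :=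
  pvAltLoop floor weighted_chances_by_floor.reverse

-- ===== PRECONDITION & SPEC =====
def Spec_get_max_value_for_floor (weighted_chances_by_floor : List (Int × Int)) (floor : Int) (out : Int) : Prop := out = get_max_value_for_floor_alt weighted_chances_by_floor floor
instance (weighted_chances_by_floor : List (Int × Int)) (floor : Int) (out : Int) : Decidable (Spec_get_max_value_for_floor weighted_chances_by_floor floor out) := by unfold Spec_get_max_value_for_floor; infer_instance

-- ===== CLAIM (what is proved, stated in full; the proofs are below) =====
def Claim_equal_get_max_value_for_floor : Prop := ∀ (weighted_chances_by_floor : List (Int × Int)) (floor : Int), Dom_get_max_value_for_floor weighted_chances_by_floor floor → Spec_get_max_value_for_floor weighted_chances_by_floor floor (get_max_value_for_floor weighted_chances_by_floor floor)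

-- ===== LEMMAS AND PROOFS =====
-- pvAltLoop with a generalized default value, for the induction
def pvLoopD (floor : Int) (d : Int) : List (Int × Int) → Int
  | [] => d
  | (fm, v) :: rest => if floor ≥ fm then v else pvLoopD floor d rest

theorem pvAltLoop_eq_loopD (floor : Int) (l : List (Int × Int)) :
    pvAltLoop floor l = pvLoopD floor 0 l := by
  induction l with
  | nil => rfl
  | cons a rest ih =>
    obtain ⟨fm, v⟩ := a
    simp only [pvAltLoop, pvLoopD, ih]

theorem pvLoopD_append_single (floor d fm v : Int) (xs : List (Int × Int)) :
    pvLoopD floor d (xs ++ [(fm, v)]) = pvLoopD floor (if floor ≥ fm then v else d) xs := by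
  induction xs with
  | nil => rfl
  | cons a rest ih =>
    obtain ⟨a1, a2⟩ := a
    simp only [List.cons_append, pvLoopD, ih]

theorem foldl_eq_loopD (floor : Int) (l : List (Int × Int)) :
    ∀ acc, l.foldl (fun current_value p => if floor ≥ p.1 then p.2 else current_value) acc
      = pvLoopD floor acc l.reverse := by
  induction l with
  | nil => intro acc; rfl
  | cons hd tl ih =>
    intro acc
    obtain ⟨fm, v⟩ := hd
    simp only [List.foldl_cons, List.reverse_cons, ih, pvLoopD_append_single]

-- ===== VERDICT (by name: the statement is the Claim_ definition above) =====
theorem get_max_value_for_floor_spec : Claim_equal_get_max_value_for_floor := by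
  intro l floor _
  unfold Spec_get_max_value_for_floor get_max_value_for_floor get_max_value_for_floor_alt
  rw [foldl_eq_loopD, pvAltLoop_eq_loopD]
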